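-- pv_equiv track=rewrite | github.com/rdlalmeida/advent_of_code | 2022/Day6/solution.py | uniqueWindow
-- ===== SOURCE A (Python) =====
-- def uniqueWindow(slot):
--     # if (len(slot) != 4):
--     #     raise Exception("ERROR: The window provided: " + slot + " does not have the required 4 characters.")
--
--     # Convert the string into a 4 element list for easier manipulation
--     slot_list = []
--     slot_list[:0] = slot
--
--     # Use a while loop to ensure all characters are different. Return false if that is not the case
--     while (len(slot_list) > 0):
--         char0 = slot_list.pop()
--
--         if(char0 in slot_list):
--             # If the character that I just extracted has a copy in the list, it means that not all characters are unique.
--             # Nothing else to do but to return the reply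
--             return False
--
--     # If the list was processed and the condition that returns False was never encountered, it means that this window has only
--     # distinct elements in it. Return True if the code gets to this point
--     return True
-- ===== SOURCE B (Python) =====
-- def uniqueWindow(slot):
--     # All characters in the window are distinct iff deduplicating changes nothing.
--     return len(set(slot)) == len(slot)
-- ===== Notes on version B (the rewrite author's own statement) =====
-- stated objective: simpler
-- what changed: Replaced the destructive pop-and-scan while loop with a single set-cardinality comparison len(set(slot)) == len(slot).
import Mathlib
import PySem

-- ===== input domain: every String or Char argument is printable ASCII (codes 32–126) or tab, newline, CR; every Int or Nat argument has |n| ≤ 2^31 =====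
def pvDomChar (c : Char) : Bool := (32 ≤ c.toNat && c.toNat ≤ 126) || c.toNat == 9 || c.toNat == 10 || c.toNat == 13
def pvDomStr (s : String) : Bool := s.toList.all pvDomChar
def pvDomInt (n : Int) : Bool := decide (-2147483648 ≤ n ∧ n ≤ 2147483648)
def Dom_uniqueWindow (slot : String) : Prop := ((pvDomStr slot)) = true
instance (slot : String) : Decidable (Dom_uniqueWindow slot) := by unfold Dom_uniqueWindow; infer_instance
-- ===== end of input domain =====

-- B replaces A's destructive pop-and-scan while loop with a single set-cardinality comparison (simpler).


-- ===== PORT A =====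
-- A's while loop: pop the last element; return False if it still occurs in the remaining list.
-- slot_list.pop() is ported as PySem.List.pop? (default index -1, exact); none = loop guard len(slot_list) > 0 fails.
def uniqueWindowLoop (l : List Char) : Bool :=
  match h : PySem.List.pop? l with
  | none => true
  | some (char0, rest) =>
    if rest.contains char0 then false
    else uniqueWindowLoop rest
termination_by l.length
decreasing_by
  have := PySem.List.length_of_pop?_eq_some l h
  simp at this ⊢
  omega

def uniqueWindow (slot : String) : Bool :=
  -- slot_list[:0] = slot turns the string into its list of characters
  uniqueWindowLoop slot.toList

-- ===== PORT B =====
-- len(set(slot)) == len(slot)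
def uniqueWindow_alt (slot : String) : Bool :=
  PySem.Set.len (PySem.Set.ofList slot.toList) == PySem.Str.len slot

-- ===== PRECONDITION & SPEC =====
def Spec_uniqueWindow (slot : String) (out : Bool) : Prop := out = uniqueWindow_alt slot
instance (slot : String) (out : Bool) : Decidable (Spec_uniqueWindow slot out) := by unfold Spec_uniqueWindow; infer_instance

-- ===== CLAIM (what is proved, stated in full; the proofs are below) =====
def Claim_equal_uniqueWindow : Prop := ∀ (slot : String), Dom_uniqueWindow slot → Spec_uniqueWindow slot (uniqueWindow slot)

-- ===== LEMMAS AND PROOFS =====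

-- A's pop-and-scan loop decides Nodup of the character list
theorem uniqueWindowLoop_eq_nodup (l : List Char) : uniqueWindowLoop l = decide l.Nodup := by
  induction l using List.reverseRecOn with
  | nil => rw [uniqueWindowLoop]; rfl
  | append_singleton xs x ih =>
    rw [uniqueWindowLoop]
    rw [PySem.List.pop?_last]
    by_cases hx : x ∈ xs
    · simp [hx, List.nodup_append]
    · simp only [List.contains_eq_mem, hx, decide_false, Bool.false_eq_true, if_false, ih,
        List.nodup_append, List.nodup_singleton, decide_eq_decide]
      constructor
      · intro h
        exact ⟨h, by simp, by intro a ha b hb; simp at hb; subst hb; exact fun h' => hx (h' ▸ ha)⟩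
      · exact fun h => h.1

-- building set(l) by folding Set.add can add at most one element per step
theorem len_foldl_add_le (l : List Char) : ∀ (s : List Char),
    (l.foldl PySem.Set.add s).length ≤ s.length + l.length := by
  induction l with
  | nil => simp
  | cons x xs ih =>
    intro s
    simp only [List.foldl_cons, List.length_cons]
    by_cases hx : x ∈ s
    · have h1 : PySem.Set.add s x = s := by simp [PySem.Set.add, hx]
      rw [h1]; have := ih s; omega
    · have h1 : PySem.Set.add s x = s ++ [x] := by simp [PySem.Set.add, hx]
      rw [h1]; have := ih (s ++ [x]); simp only [List.length_append, List.length_cons,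
        List.length_nil] at this; omega

-- the fold reaches full length exactly when the new elements are fresh and pairwise distinct
theorem len_foldl_add_eq_iff (l : List Char) : ∀ (s : List Char), s.Nodup →
    ((l.foldl PySem.Set.add s).length = s.length + l.length ↔ s.Disjoint l ∧ l.Nodup) := by
  induction l with
  | nil => intro s _; simp [List.Disjoint]
  | cons x xs ih =>
    intro s hs
    simp only [List.foldl_cons, List.length_cons]
    by_cases hx : x ∈ s
    · have h1 : PySem.Set.add s x = s := by simp [PySem.Set.add, hx]
      rw [h1]
      have hle := len_foldl_add_le xs s
      constructor
      · intro h; exact absurd h (by omega)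
      · rintro ⟨hd, -⟩; exact (hd hx (by simp)).elim
    · have h1 : PySem.Set.add s x = s ++ [x] := by simp [PySem.Set.add, hx]
      rw [h1]
      have hs' : (s ++ [x]).Nodup := by
        rw [List.nodup_append]
        exact ⟨hs, List.nodup_singleton x,
          by intro a ha b hb; simp at hb; subst hb; exact fun h' => hx (h' ▸ ha)⟩
      have hlen : s.length + (xs.length + 1) = (s ++ [x]).length + xs.length := by
        simp; omega
      rw [hlen, ih (s ++ [x]) hs']
      simp only [List.disjoint_append_left, List.singleton_disjoint,
        List.disjoint_cons_right, List.nodup_cons]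
      tauto

-- B's cardinality test also decides Nodup
theorem alt_eq_nodup (slot : String) : uniqueWindow_alt slot = decide slot.toList.Nodup := by
  unfold uniqueWindow_alt
  have h := len_foldl_add_eq_iff slot.toList [] (by simp)
  simp only [List.length_nil, Nat.zero_add, List.disjoint_nil_left, true_and] at h
  rw [PySem.Str.len_eq]
  have hlist : PySem.Set.ofList slot.toList = slot.toList.foldl PySem.Set.add [] := rfl
  by_cases hn : slot.toList.Nodup
  · have := h.mpr hn
    simp [PySem.Set.len, hlist, this, hn]
  · have hne : (slot.toList.foldl PySem.Set.add []).length ≠ slot.toList.length :=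
      fun he => hn (h.mp he)
    simp only [PySem.Set.len, hlist, hn, decide_false, beq_eq_false_iff_ne, ne_eq]
    intro hc
    exact hne (by exact_mod_cast hc)

-- ===== VERDICT (by name: the statement is the Claim_ definition above) =====
theorem uniqueWindow_spec : Claim_equal_uniqueWindow := by
  intro slot _
  unfold Spec_uniqueWindow uniqueWindow
  rw [uniqueWindowLoop_eq_nodup, alt_eq_nodup]
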